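-- pv_equiv track=rewrite | github.com/closetmuse/Groundtruthv2 | gs/classify.py | _get_deal_name_keywords
-- ===== SOURCE A (Python) =====
-- def _get_deal_name_keywords(deal_name: str) -> list[str]:
--     """
--     Extract searchable keywords from deal name.
--
--     Filters out generic infrastructure words that would match
--     every signal (energy, power, solar, gas, etc.)
--     """
--     name_lower = deal_name.lower()
--     # Generic words that appear in deal names but match too broadly
--     skip = {
--         "project", "the", "a", "and", "of", "for",
--         "energy", "power", "solar", "wind", "gas", "lng",
--         "data", "center", "digital", "infra", "infrastructure",
--         "clean", "portfolio", "new", "industrial",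
--     }
--     keywords = [name_lower]  # Full name always matches
--     parts = name_lower.split()
--     # Only add specific words (deal-identifying, not sector-generic)
--     keywords.extend([p for p in parts if p not in skip and len(p) > 3])
--     # Add hyphenated variants
--     for p in parts:
--         if "-" in p:
--             keywords.append(p.replace("-", ""))
--     return keywords
-- ===== SOURCE B (Python) =====
-- def _get_deal_name_keywords(deal_name: str) -> list[str]:
--     """Recursive decomposition: structural recursion on the word list returns
--     the (filtered, variants) pair at once, built front-to-back by consing onto
--     the recursive result; no imperative passes or appends."""
--     name_lower = deal_name.lower()
--     skip = {
--         "project", "the", "a", "and", "of", "for",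
--         "energy", "power", "solar", "wind", "gas", "lng",
--         "data", "center", "digital", "infra", "infrastructure",
--         "clean", "portfolio", "new", "industrial",
--     }
--
--     def go(ws):
--         if not ws:
--             return [], []
--         p = ws[0]
--         f, v = go(ws[1:])
--         if p not in skip and len(p) > 3:
--             f = [p] + f
--         if "-" in p:
--             v = [p.replace("-", "")] + v
--         return f, v
--
--     f, v = go(name_lower.split())
--     return [name_lower] + f + v
-- ===== Notes on version B (the rewrite author's own statement) =====
-- stated objective: alternative
-- what changed: Replaces A's two imperative passes (a filtering comprehension plus an appending for-loop) with one structural recursion over the word list that returns the (filtered, variants) pair, building both lists front-to-back by consing onto the recursive result.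
import Mathlib
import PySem

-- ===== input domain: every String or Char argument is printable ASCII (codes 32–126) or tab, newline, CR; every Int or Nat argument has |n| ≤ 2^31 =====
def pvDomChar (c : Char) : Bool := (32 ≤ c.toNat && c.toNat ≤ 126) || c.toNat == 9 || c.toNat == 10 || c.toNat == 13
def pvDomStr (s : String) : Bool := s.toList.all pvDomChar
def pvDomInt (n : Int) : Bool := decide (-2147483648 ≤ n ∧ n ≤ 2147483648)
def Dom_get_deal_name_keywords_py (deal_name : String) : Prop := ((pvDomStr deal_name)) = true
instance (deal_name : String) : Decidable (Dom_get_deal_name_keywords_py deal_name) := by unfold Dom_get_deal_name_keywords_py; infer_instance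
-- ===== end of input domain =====

-- B replaces A's two imperative passes with one structural recursion over the
-- word list returning the (filtered, variants) pair built by consing (objective: alternative).

-- ===== PORT A =====
def pvSkip : List String :=
  ["project", "the", "a", "and", "of", "for",
   "energy", "power", "solar", "wind", "gas", "lng",
   "data", "center", "digital", "infra", "infrastructure",
   "clean", "portfolio", "new", "industrial"]

def get_deal_name_keywords_py (deal_name : String) : List String :=
  let name_lower := PySem.Str.lower deal_name
  let parts := PySem.Str.split₀ name_lower
  -- keywords = [name_lower]; keywords.extend([p for p in parts if p not in skip and len(p) > 3])
  let keywords := [name_lower] ++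
    parts.filter (fun p => !(pvSkip.contains p) && decide (3 < PySem.Str.len p))
  -- for p in parts: if "-" in p: keywords.append(p.replace("-", ""))
  parts.foldl (fun ks p =>
    if PySem.Str.isIn "-" p then ks ++ [PySem.Str.replace p "-" ""] else ks) keywords

-- ===== PORT B =====
-- structural recursion returning the (filtered, variants) pair, consing onto the recursive result
def pvGo : List String → List String × List String
  | [] => ([], [])
  | p :: ws =>
    let fv := pvGo ws
    let f := if !(pvSkip.contains p) && decide (3 < PySem.Str.len p) then p :: fv.1 else fv.1
    let v := if PySem.Str.isIn "-" p then PySem.Str.replace p "-" "" :: fv.2 else fv.2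
    (f, v)

def get_deal_name_keywords_py_alt (deal_name : String) : List String :=
  let name_lower := PySem.Str.lower deal_name
  let fv := pvGo (PySem.Str.split₀ name_lower)
  [name_lower] ++ fv.1 ++ fv.2

-- ===== PRECONDITION & SPEC =====
def Spec_get_deal_name_keywords_py (deal_name : String) (out : List String) : Prop := out = get_deal_name_keywords_py_alt deal_name
instance (deal_name : String) (out : List String) : Decidable (Spec_get_deal_name_keywords_py deal_name out) := by unfold Spec_get_deal_name_keywords_py; infer_instance

-- ===== CLAIM (what is proved, stated in full; the proofs are below) =====
def Claim_equal_get_deal_name_keywords_py : Prop := ∀ (deal_name : String), Dom_get_deal_name_keywords_py deal_name → Spec_get_deal_name_keywords_py deal_name (get_deal_name_keywords_py deal_name)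

-- ===== LEMMAS AND PROOFS =====

-- B's recursion computes the filter and the mapped filter of the word list.
theorem pvGo_eq (l : List String) :
    pvGo l = (l.filter (fun p => !(pvSkip.contains p) && decide (3 < PySem.Str.len p)),
              (l.filter (fun p => PySem.Str.isIn "-" p)).map (fun p => PySem.Str.replace p "-" "")) := by
  induction l with
  | nil => rfl
  | cons a t ih =>
    simp only [pvGo, ih, List.filter_cons, PySem.Str.isIn]
    by_cases h1 : (!(pvSkip.contains a) && decide (3 < PySem.Str.len a)) = true <;>
      by_cases h2 : PySem.Chars.isIn ['-'] a.toList = true <;> simp [h1, h2]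

theorem get_deal_name_keywords_eq (deal_name : String) :
    get_deal_name_keywords_py deal_name = get_deal_name_keywords_py_alt deal_name := by
  unfold get_deal_name_keywords_py get_deal_name_keywords_py_alt
  simp only [pvGo_eq, PySem.List.foldl_append_if, List.append_assoc]

-- ===== VERDICT (by name: the statement is the Claim_ definition above) =====
theorem get_deal_name_keywords_py_spec : Claim_equal_get_deal_name_keywords_py := by
  intro d _
  exact get_deal_name_keywords_eq d
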